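-- pv_equiv track=rewrite | github.com/evanwellmeyer/GCM | scm/calibration.py | _candidate_member_indices
-- ===== SOURCE A (Python) =====
-- def _candidate_member_indices(n_candidates, n_bm_per_candidate, n_mf_per_candidate):
--     """Return member indices for each candidate within a batched chunk."""
--
--     member_indices = []
--     bm_block = n_candidates * n_bm_per_candidate
--
--     for idx in range(n_candidates):
--         indices = []
--         if n_bm_per_candidate:
--             start = idx * n_bm_per_candidate
--             indices.extend(range(start, start + n_bm_per_candidate))
--         if n_mf_per_candidate:
--             start = bm_block + idx * n_mf_per_candidate
--             indices.extend(range(start, start + n_mf_per_candidate))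
--         member_indices.append(indices)
--
--     return member_indices
-- ===== SOURCE B (Python) =====
-- def _candidate_member_indices(n_candidates, n_bm_per_candidate, n_mf_per_candidate):
--     """Return member indices for each candidate within a batched chunk."""
--
--     result = [[] for _ in range(n_candidates)]
--     bm_block = n_candidates * n_bm_per_candidate
--
--     if n_bm_per_candidate > 0:
--         for j in range(n_candidates * n_bm_per_candidate):
--             result[j // n_bm_per_candidate].append(j)
--
--     if n_mf_per_candidate > 0:
--         for j in range(n_candidates * n_mf_per_candidate):
--             result[j // n_mf_per_candidate].append(bm_block + j)
--
--     return result
-- ===== Notes on version B (the rewrite author's own statement) =====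
-- stated objective: alternative
-- what changed: Instead of building each candidate's contiguous index ranges in an outer per-candidate loop, B preallocates the buckets and scatters each flat member index j into its owner bucket j // count in two flat passes over all member indices.
import Mathlib
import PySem

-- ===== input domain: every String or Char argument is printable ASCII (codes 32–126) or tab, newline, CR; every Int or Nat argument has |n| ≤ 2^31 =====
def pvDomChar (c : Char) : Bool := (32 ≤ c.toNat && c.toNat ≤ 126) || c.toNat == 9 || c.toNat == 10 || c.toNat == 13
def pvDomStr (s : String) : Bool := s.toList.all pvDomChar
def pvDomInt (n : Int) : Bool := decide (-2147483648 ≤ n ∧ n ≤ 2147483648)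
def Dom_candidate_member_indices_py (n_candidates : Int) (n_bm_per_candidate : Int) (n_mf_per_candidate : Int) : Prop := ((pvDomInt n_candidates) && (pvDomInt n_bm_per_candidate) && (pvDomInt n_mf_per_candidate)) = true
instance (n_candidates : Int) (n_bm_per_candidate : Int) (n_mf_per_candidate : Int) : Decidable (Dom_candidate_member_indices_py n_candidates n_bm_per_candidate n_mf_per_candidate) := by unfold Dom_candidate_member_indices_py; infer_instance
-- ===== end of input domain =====

-- B builds the same per-candidate member lists by scattering each flat member index into its
-- owner's bucket (j // count) in two flat passes, instead of A's per-candidate contiguous ranges.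

-- ===== PORT A =====
def candidate_member_indices_py (n_candidates : Int) (n_bm_per_candidate : Int) (n_mf_per_candidate : Int) : List (List Int) :=
  let bm_block := n_candidates * n_bm_per_candidate
  (PySem.List.pyRange 0 n_candidates 1).foldl (fun member_indices idx =>
    let indices : List Int := []
    let indices := if n_bm_per_candidate ≠ 0 then
        indices ++ PySem.List.pyRange (idx * n_bm_per_candidate) (idx * n_bm_per_candidate + n_bm_per_candidate) 1
      else indices
    let indices := if n_mf_per_candidate ≠ 0 then
        indices ++ PySem.List.pyRange (bm_block + idx * n_mf_per_candidate) (bm_block + idx * n_mf_per_candidate + n_mf_per_candidate) 1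
      else indices
    member_indices ++ [indices]) []

-- ===== PORT B =====
-- result[i].append(v): in B the index i is always a valid nonnegative index
def pvAppendAt (r : List (List Int)) (i : Nat) (v : Int) : List (List Int) :=
  r.modify i (fun b => b ++ [v])

def candidate_member_indices_py_alt (n_candidates : Int) (n_bm_per_candidate : Int) (n_mf_per_candidate : Int) : List (List Int) :=
  let result : List (List Int) := (PySem.List.pyRange 0 n_candidates 1).map (fun _ => [])
  let bm_block := n_candidates * n_bm_per_candidate
  let result := if n_bm_per_candidate > 0 then
      (PySem.List.pyRange 0 (n_candidates * n_bm_per_candidate) 1).foldl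
        (fun r j => pvAppendAt r (PySem.Int.floordiv j n_bm_per_candidate).toNat j) result
    else result
  if n_mf_per_candidate > 0 then
      (PySem.List.pyRange 0 (n_candidates * n_mf_per_candidate) 1).foldl
        (fun r j => pvAppendAt r (PySem.Int.floordiv j n_mf_per_candidate).toNat (bm_block + j)) result
  else result

-- ===== PRECONDITION & SPEC =====
def Spec_candidate_member_indices_py (n_candidates : Int) (n_bm_per_candidate : Int) (n_mf_per_candidate : Int) (out : List (List Int)) : Prop := out = candidate_member_indices_py_alt n_candidates n_bm_per_candidate n_mf_per_candidate
instance (n_candidates : Int) (n_bm_per_candidate : Int) (n_mf_per_candidate : Int) (out : List (List Int)) : Decidable (Spec_candidate_member_indices_py n_candidates n_bm_per_candidate n_mf_per_candidate out) := by unfold Spec_candidate_member_indices_py; infer_instance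

-- ===== CLAIM (what is proved, stated in full; the proofs are below) =====
def Claim_equal_candidate_member_indices_py : Prop := ∀ (n_candidates : Int) (n_bm_per_candidate : Int) (n_mf_per_candidate : Int), Dom_candidate_member_indices_py n_candidates n_bm_per_candidate n_mf_per_candidate → Spec_candidate_member_indices_py n_candidates n_bm_per_candidate n_mf_per_candidate (candidate_member_indices_py n_candidates n_bm_per_candidate n_mf_per_candidate)

-- ===== LEMMAS AND PROOFS =====

theorem pyRange_nil (a b : Int) (h : b ≤ a) : PySem.List.pyRange a b = [] := by simp [pysem, h]

theorem shiftR (c : Int) : ∀ (n : Nat) (a b : Int), b - a = n →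
    (PySem.List.pyRange a b).map (fun j => c + j) = PySem.List.pyRange (c+a) (c+b) := by
  intro n
  induction n with
  | zero =>
      intro a b h
      have hba : b ≤ a := by omega
      simp [pysem, hba, show c + b ≤ c + a by omega]
  | succ m ih =>
      intro a b h
      have hab : a < b := by omega
      rw [PySem.List.pyRange_one_cons hab, PySem.List.pyRange_one_cons (show c+a < c+b by omega)]
      simp only [List.map_cons]
      rw [ih (a+1) b (by omega)]
      rw [show c+(a+1) = c+a+1 by ring]

theorem lemR : ∀ (r : List (List Int)), r = (List.range r.length).map (fun i => r.getD i []) := by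
  intro r; apply List.ext_getElem
  · simp
  · intro i p _; simp [List.getD_eq_getElem?_getD, List.getElem?_eq_getElem p]

theorem lemSet (N k : Nat) (g : Nat → List Int) (v : List Int) (hk : k < N) :
    ((List.range N).map g).set k v = (List.range N).map (fun i => if i = k then v else g i) := by
  apply List.ext_getElem
  · simp
  · intro i p q; simp only [List.getElem_set] at *
    simp at p
    simp [List.getElem_map, List.getElem_range]
    split <;> rename_i h2
    · simp [h2.symm]
    · rw [if_neg (fun h3 => h2 h3.symm)]

theorem pvAppendAt_eq (r : List (List Int)) (i : Nat) (v : Int) :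
    pvAppendAt r i v = r.set i (r.getD i [] ++ [v]) := by
  unfold pvAppendAt
  induction r generalizing i with
  | nil => cases i <;> simp [List.modifyTailIdx]
  | cons a t ih =>
      cases i with
      | zero => simp [List.modify]
      | succ m => simp [List.modify]; simpa using ih m

theorem blockfold (l : List Int) (f : Int → Int) : ∀ (r : List (List Int)) (i : Nat), i < r.length →
    l.foldl (fun r j => pvAppendAt r i (f j)) r = r.set i (r.getD i [] ++ l.map f) := by
  induction l with
  | nil =>
      intro r i h
      simp [List.getD_eq_getElem?_getD, List.getElem?_eq_getElem h, List.set_getElem_self]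
  | cons a t ih =>
      intro r i h
      simp only [List.foldl_cons, List.map_cons]
      rw [ih _ i (by simp [pvAppendAt_eq, h])]
      simp [pvAppendAt_eq, List.getD_eq_getElem?_getD, List.getElem?_set_self', List.set_set,
        List.getElem?_eq_getElem h]

theorem scatter (n : Int) (hn : 0 < n) (f : Int → Int) :
    ∀ (k : Nat) (r : List (List Int)), k ≤ r.length →
    (PySem.List.pyRange 0 ((k : Int) * n)).foldl
        (fun r j => pvAppendAt r (PySem.Int.floordiv j n).toNat (f j)) r
    = (List.range r.length).map
        (fun i => r.getD i [] ++ if i < k then (PySem.List.pyRange ((i : Int) * n) ((i : Int) * n + n)).map f else []) := by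
  intro k
  induction k with
  | zero =>
      intro r _
      simp only [Nat.cast_zero, zero_mul, pyRange_nil 0 0 le_rfl, List.foldl_nil]
      conv_lhs => rw [lemR r]
      simp
  | succ m ih =>
      intro r hk
      have h1 : (0:Int) ≤ (m:Int)*n := by positivity
      rw [show (((m+1:Nat)):Int) = ((m:Int)+1) by push_cast; ring] at *
      rw [PySem.List.pyRange_one_append 0 ((m:Int)*n) (((m:Int)+1)*n) h1 (by nlinarith),
        List.foldl_append]
      rw [ih r (by omega)]
      set R := (List.range r.length).map
        (fun i => r.getD i [] ++ if i < m then (PySem.List.pyRange ((i : Int) * n) ((i : Int) * n + n)).map f else []) with hR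
      have hcongr : (PySem.List.pyRange ((m:Int)*n) (((m:Int)+1)*n)).foldl
          (fun r j => pvAppendAt r (PySem.Int.floordiv j n).toNat (f j)) R
          = (PySem.List.pyRange ((m:Int)*n) (((m:Int)+1)*n)).foldl (fun r j => pvAppendAt r m (f j)) R := by
        apply PySem.List.foldl_congr_mem
        intro acc x hx
        rw [PySem.List.mem_pyRange_one] at hx
        have : PySem.Int.floordiv x n = (m:Int) := by
          rw [PySem.Int.floordiv_eq_iff_of_pos hn]
          exact ⟨hx.1, hx.2⟩
        rw [this]; simp
      rw [hcongr, blockfold _ f R m (by simp [hR]; omega)]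
      have hgetD : R.getD m [] = r.getD m [] := by
        rw [hR, PySem.List.getD_map_range _ _ _ _ (by omega)]
        simp
      rw [hgetD, hR, lemSet r.length m _ _ (by omega)]
      apply List.map_congr_left
      intro i hi
      simp only [List.mem_range] at hi
      by_cases h3 : i = m
      · subst h3
        simp [show i < i + 1 from by omega]
        rw [show ((i:Int)+1)*n = (i:Int)*n + n by ring]
      · rw [if_neg h3]
        by_cases h4 : i < m
        · simp [h4, show i < m+1 from by omega]
        · simp [h4, show ¬ (i < m+1) from by omega]

theorem scatter_id (n : Int) (hn : 0 < n) (k : Nat) (r : List (List Int)) (hk : k ≤ r.length) :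
    (PySem.List.pyRange 0 ((k : Int) * n)).foldl
        (fun r j => pvAppendAt r (PySem.Int.floordiv j n).toNat j) r
    = (List.range r.length).map
        (fun i => r.getD i [] ++ if i < k then PySem.List.pyRange ((i : Int) * n) ((i : Int) * n + n) else []) := by
  have h := scatter n hn (fun j => j) k r hk
  simpa using h

theorem scatter_add (n : Int) (hn : 0 < n) (c : Int) (k : Nat) (r : List (List Int)) (hk : k ≤ r.length) :
    (PySem.List.pyRange 0 ((k : Int) * n)).foldl
        (fun r j => pvAppendAt r (PySem.Int.floordiv j n).toNat (c + j)) r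
    = (List.range r.length).map
        (fun i => r.getD i [] ++ if i < k then PySem.List.pyRange (c + (i : Int) * n) (c + (i : Int) * n + n) else []) := by
  have h := scatter n hn (fun j => c + j) k r hk
  rw [h]
  apply List.map_congr_left
  intro i _
  congr 1
  split
  · rw [shiftR c n.toNat _ _ (by omega), show c + ((i:Int)*n + n) = c + (i:Int)*n + n by ring]
  · rfl

-- ===== VERDICT (by name: the statement is the Claim_ definition above) =====
theorem candidate_member_indices_py_spec : Claim_equal_candidate_member_indices_py := by
  intro nc nbm nmf _
  unfold Spec_candidate_member_indices_py
  by_cases hnc : 0 < nc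
  · obtain ⟨N, rfl⟩ : ∃ N : Nat, nc = (N:Int) := ⟨nc.toNat, by omega⟩
    have hA : candidate_member_indices_py (N:Int) nbm nmf
        = (List.range N).map (fun (i : Nat) =>
            PySem.List.pyRange ((i:Int)*nbm) ((i:Int)*nbm+nbm)
            ++ PySem.List.pyRange ((N:Int)*nbm+(i:Int)*nmf) ((N:Int)*nbm+(i:Int)*nmf+nmf)) := by
      simp only [candidate_member_indices_py]
      rw [PySem.List.foldl_append_singleton_eq_map]
      rw [PySem.List.pyRange_zero_natCast, List.map_map]
      simp only [List.nil_append, Function.comp_def]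
      apply List.map_congr_left
      intro i _
      have e1 : (if nbm ≠ 0 then PySem.List.pyRange ((i:Int)*nbm) ((i:Int)*nbm+nbm) else ([]:List Int))
          = PySem.List.pyRange ((i:Int)*nbm) ((i:Int)*nbm+nbm) := by
        by_cases h : nbm = 0
        · subst h; simp [pyRange_nil _ _ le_rfl]
        · simp [h]
      rw [e1]
      by_cases h2 : nmf = 0
      · subst h2; simp [pyRange_nil _ _ le_rfl]
      · simp [h2]
    have phase2 : ∀ (g : Nat → List Int),
        (if nmf > 0 then
            (PySem.List.pyRange 0 ((N:Int)*nmf)).foldl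
              (fun r j => pvAppendAt r (PySem.Int.floordiv j nmf).toNat ((N:Int)*nbm + j))
              ((List.range N).map g)
          else ((List.range N).map g))
        = (List.range N).map (fun (i : Nat) => g i ++ PySem.List.pyRange ((N:Int)*nbm + (i:Int)*nmf) ((N:Int)*nbm + (i:Int)*nmf + nmf)) := by
      intro g
      by_cases hm : nmf > 0
      · rw [if_pos hm, scatter_add nmf hm ((N:Int)*nbm) N _ (by simp)]
        simp only [List.length_map, List.length_range]
        apply List.map_congr_left
        intro i hi
        simp only [List.mem_range] at hi
        rw [PySem.List.getD_map_range _ _ _ _ hi, if_pos hi]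
      · rw [if_neg hm]
        apply List.map_congr_left
        intro i _
        rw [pyRange_nil _ _ (by linarith [le_of_not_gt hm])]
        simp
    have hB : candidate_member_indices_py_alt (N:Int) nbm nmf
        = (List.range N).map (fun (i : Nat) =>
            PySem.List.pyRange ((i:Int)*nbm) ((i:Int)*nbm+nbm)
            ++ PySem.List.pyRange ((N:Int)*nbm+(i:Int)*nmf) ((N:Int)*nbm+(i:Int)*nmf+nmf)) := by
      simp only [candidate_member_indices_py_alt]
      rw [PySem.List.pyRange_zero_natCast, List.map_map]
      simp only [Function.comp_def]
      have hB1 : (if nbm > 0 then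
            (PySem.List.pyRange 0 ((N:Int)*nbm)).foldl
              (fun r j => pvAppendAt r (PySem.Int.floordiv j nbm).toNat j)
              ((List.range N).map (fun _ => ([]:List Int)))
          else ((List.range N).map (fun _ => ([]:List Int))))
          = (List.range N).map (fun (i : Nat) => PySem.List.pyRange ((i:Int)*nbm) ((i:Int)*nbm+nbm)) := by
        by_cases hb : nbm > 0
        · rw [if_pos hb, scatter_id nbm hb N _ (by simp)]
          simp only [List.length_map, List.length_range]
          apply List.map_congr_left
          intro i hi
          simp only [List.mem_range] at hi
          rw [PySem.List.getD_map_range _ _ _ _ hi, if_pos hi]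
          simp
        · rw [if_neg hb]
          apply List.map_congr_left
          intro i _
          rw [pyRange_nil _ _ (by linarith [le_of_not_gt hb])]
      rw [hB1, phase2]
    rw [hA, hB]
  · have h0 : nc ≤ 0 := by omega
    simp only [candidate_member_indices_py, candidate_member_indices_py_alt,
      pyRange_nil 0 nc h0, List.foldl_nil, List.map_nil]
    split_ifs with h1 h2 h3
    · rw [pyRange_nil 0 (nc*nbm) (by nlinarith [mul_nonneg (neg_nonneg.2 h0) h2.le]), List.foldl_nil,
        pyRange_nil 0 (nc*nmf) (by nlinarith [mul_nonneg (neg_nonneg.2 h0) h1.le]), List.foldl_nil]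
    · rw [pyRange_nil 0 (nc*nmf) (by nlinarith [mul_nonneg (neg_nonneg.2 h0) h1.le]), List.foldl_nil]
    · rw [pyRange_nil 0 (nc*nbm) (by nlinarith [mul_nonneg (neg_nonneg.2 h0) h3.le]), List.foldl_nil]
    · rfl
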